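-- pv_equiv track=rewrite | github.com/deloitte-nl/knowledge-enriched-chatbot | src/RAG/document_loader.py | _check_emptiness
-- ===== SOURCE A (Python) =====
-- def _check_emptiness(page_content: str) -> bool:
--     """
--     Check if document content is empty of text, by evaluating whether
--     there are at least 3 consecutive alphabet characters in there.
--     """
--     min_consecutive_chars = 3
--     for letter in page_content:
--         if letter.isalpha():
--             min_consecutive_chars -= 1
--         else:
--             min_consecutive_chars = 3
--         if min_consecutive_chars == 0:
--             return False
--     return True
-- ===== SOURCE B (Python) =====
-- def _check_emptiness(page_content: str) -> bool:
--     """True iff the string contains no window of 3 consecutive alphabetic chars."""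
--     return not any(
--         page_content[i].isalpha()
--         and page_content[i + 1].isalpha()
--         and page_content[i + 2].isalpha()
--         for i in range(len(page_content) - 2)
--     )
-- ===== Notes on version B (the rewrite author's own statement) =====
-- stated objective: idiomatic
-- what changed: Replaced the stateful countdown-and-reset counter loop with a stateless sliding-window test that asks whether any 3-character window is fully alphabetic.
import Mathlib
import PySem

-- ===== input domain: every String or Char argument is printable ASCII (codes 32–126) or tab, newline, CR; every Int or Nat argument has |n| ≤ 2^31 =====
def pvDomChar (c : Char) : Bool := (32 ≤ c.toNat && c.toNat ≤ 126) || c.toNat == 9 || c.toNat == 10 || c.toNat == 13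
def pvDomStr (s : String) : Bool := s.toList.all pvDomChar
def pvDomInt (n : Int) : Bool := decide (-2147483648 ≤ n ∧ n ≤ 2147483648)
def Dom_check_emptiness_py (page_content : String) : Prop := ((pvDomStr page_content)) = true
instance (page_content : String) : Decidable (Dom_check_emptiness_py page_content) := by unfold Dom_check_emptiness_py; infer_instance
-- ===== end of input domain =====

-- B replaces A's countdown-and-reset counter loop with a stateless sliding-window
-- test over 3-character windows (idiomatic 'not any'); return values agree everywhere.

-- ===== PORT A =====
-- A's for-loop with early return: counter starts at 3, decremented on alpha,
-- reset to 3 otherwise, returns False when it hits 0.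
def pvALoop (c : Int) : List Char → Bool
  | [] => true
  | x :: xs =>
    let c' := if x.isAlpha then c - 1 else 3
    if c' = 0 then false else pvALoop c' xs

def check_emptiness_py (page_content : String) : Bool :=
  pvALoop 3 page_content.toList

-- ===== PORT B =====
-- Source B's 'not any' over 3-char windows: scan the sliding window directly.
def pvBLoop : List Char → Bool
  | a :: b :: c :: rest =>
    if a.isAlpha && b.isAlpha && c.isAlpha then false else pvBLoop (b :: c :: rest)
  | _ => true

def check_emptiness_py_alt (page_content : String) : Bool :=
  pvBLoop page_content.toList

-- ===== PRECONDITION & SPEC =====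
def Spec_check_emptiness_py (page_content : String) (out : Bool) : Prop := out = check_emptiness_py_alt page_content
instance (page_content : String) (out : Bool) : Decidable (Spec_check_emptiness_py page_content out) := by unfold Spec_check_emptiness_py; infer_instance

-- ===== CLAIM (what is proved, stated in full; the proofs are below) =====
def Claim_equal_check_emptiness_py : Prop := ∀ (page_content : String), Dom_check_emptiness_py page_content → Spec_check_emptiness_py page_content (check_emptiness_py page_content)

-- ===== LEMMAS AND PROOFS =====

-- "the first n characters exist and are alphabetic"
def pvTakeA : Nat → List Char → Bool
  | 0, _ => true
  | _ + 1, [] => false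
  | n + 1, x :: xs => x.isAlpha && pvTakeA n xs

theorem pvBLoop_of_takeA3 (l : List Char) (h : pvTakeA 3 l = true) : pvBLoop l = false := by
  match l with
  | a :: b :: c :: rest =>
    simp [pvTakeA] at h
    simp [pvBLoop, h.1, h.2.1, h.2.2]
  | [] | [_] | [_, _] => simp [pvTakeA] at h

theorem pvALoop_eq (l : List Char) : ∀ c : Int, c = 1 ∨ c = 2 ∨ c = 3 →
    pvALoop c l = (!pvTakeA c.toNat l && pvBLoop l) := by
  induction l with
  | nil => rintro c (rfl | rfl | rfl) <;> simp [pvALoop, pvTakeA, pvBLoop]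
  | cons x xs ih =>
    rintro c hc
    by_cases hx : x.isAlpha
    · rcases hc with rfl | rfl | rfl
      · simp [pvALoop, pvTakeA, hx]
      · rw [show pvALoop 2 (x :: xs) = pvALoop 1 xs by simp [pvALoop, hx],
          ih 1 (Or.inl rfl)]
        cases xs with
        | nil => simp [pvTakeA, pvBLoop, hx]
        | cons b ys =>
          cases ys with
          | nil => simp [pvTakeA, pvBLoop, hx]
          | cons c zs =>
            by_cases hb : b.isAlpha <;> by_cases hcz : c.isAlpha <;>
              simp [pvTakeA, pvBLoop, hx, hb, hcz]
      · rw [show pvALoop 3 (x :: xs) = pvALoop 2 xs by simp [pvALoop, hx],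
          ih 2 (Or.inr (Or.inl rfl))]
        cases xs with
        | nil => simp [pvTakeA, pvBLoop, hx]
        | cons b ys =>
          cases ys with
          | nil => simp [pvTakeA, pvBLoop, hx]
          | cons c zs =>
            by_cases hb : b.isAlpha <;> by_cases hcz : c.isAlpha <;>
              simp [pvTakeA, pvBLoop, hx, hb, hcz]
    · have step : pvALoop c (x :: xs) = pvALoop 3 xs := by
        rcases hc with rfl | rfl | rfl <;> simp [pvALoop, hx]
      rw [step, ih 3 (Or.inr (Or.inr rfl))]
      simp only [show (3:Int).toNat = 3 from rfl]
      have hfront : pvTakeA c.toNat (x :: xs) = false := by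
        rcases hc with rfl | rfl | rfl <;> simp [pvTakeA, hx]
      rw [hfront]
      cases xs with
      | nil => simp [pvTakeA, pvBLoop]
      | cons b ys =>
        by_cases h3 : pvTakeA 3 (b :: ys) = true
        · rw [h3, pvBLoop_of_takeA3 _ h3]
          have : pvBLoop (x :: b :: ys) = false := by
            cases ys with
            | nil => simp [pvTakeA] at h3
            | cons c zs =>
              simp [pvTakeA] at h3
              simp [pvBLoop, hx, pvBLoop_of_takeA3 (b :: c :: zs) (by simp [pvTakeA, h3.1, h3.2.1, h3.2.2])]
          simp [this]
        · rw [Bool.not_eq_true] at h3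
          rw [h3]
          have : pvBLoop (x :: b :: ys) = pvBLoop (b :: ys) := by
            cases ys with
            | nil => simp [pvBLoop]
            | cons c zs => simp [pvBLoop, hx]
          simp [this]

-- ===== VERDICT (by name: the statement is the Claim_ definition above) =====
theorem check_emptiness_py_spec : Claim_equal_check_emptiness_py := by
  intro s _
  unfold Spec_check_emptiness_py check_emptiness_py check_emptiness_py_alt
  rw [pvALoop_eq _ 3 (Or.inr (Or.inr rfl))]
  cases h : pvTakeA 3 s.toList
  · simp [show (3:Int).toNat = 3 from rfl, h]
  · simp [show (3:Int).toNat = 3 from rfl, h, pvBLoop_of_takeA3 _ h]
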